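-- pv_equiv track=rewrite | github.com/AppPlatform-Templates/devcontainer-appplatform | test-suite/python/tests/test_kafka.py | _prioritize_brokers
-- ===== SOURCE A (Python) =====
-- LOOPBACK_HOSTS = {"localhost", "127.0.0.1"}
--
-- KAFKA_INTERNAL_ENDPOINT = "kafka:29092"
--
-- def _parse_host_port(entry: str) -> tuple[str, int]:
--     host, _, port = entry.partition(":")
--     return host or "kafka", int(port or "29092")
--
-- def _prioritize_brokers(raw_brokers: list[str]) -> list[str]:
--     normalized: list[str] = []
--     seen: set[str] = set()
--     for broker in raw_brokers:
--         if not broker: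
--             continue
--         host, port = _parse_host_port(broker.strip())
--         entry = f"{host}:{port}"
--         if entry not in seen:
--             normalized.append(entry)
--             seen.add(entry)
--
--     prioritized: list[str] = []
--     has_kafka_host = any(_parse_host_port(entry)[0] == "kafka" for entry in normalized)
--     if has_kafka_host:
--         prioritized.append(KAFKA_INTERNAL_ENDPOINT)
--
--     # Prefer non-loopback entries next, then fall back to loopback/localhost endpoints.
--     for entry in normalized:
--         host, _ = _parse_host_port(entry)
--         if entry not in prioritized and host not in LOOPBACK_HOSTS:
--             prioritized.append(entry)
--     for entry in normalized:
--         if entry not in prioritized: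
--             prioritized.append(entry)
--
--     return prioritized or [KAFKA_INTERNAL_ENDPOINT]
-- ===== SOURCE B (Python) =====
-- LOOPBACK_HOSTS = {"localhost", "127.0.0.1"}
--
-- KAFKA_INTERNAL_ENDPOINT = "kafka:29092"
--
-- def _normalize(broker: str) -> tuple[str, str]:
--     host, _, port = broker.strip().partition(":")
--     host = host or "kafka"
--     return host, f"{host}:{int(port or '29092')}"
--
-- def _prioritize_brokers(raw_brokers: list[str]) -> list[str]:
--     # One pass: normalize/dedup and classify each new entry immediately.
--     seen: set[str] = set()
--     non_loopback: list[str] = []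
--     loopback: list[str] = []
--     has_kafka = False
--     for broker in raw_brokers:
--         if not broker:
--             continue
--         host, entry = _normalize(broker)
--         if entry in seen:
--             continue
--         seen.add(entry)
--         if host == "kafka":
--             has_kafka = True
--             if entry == KAFKA_INTERNAL_ENDPOINT:
--                 continue  # represented by the prepended internal endpoint
--         if host in LOOPBACK_HOSTS:
--             loopback.append(entry)
--         else:
--             non_loopback.append(entry)
--     result = ([KAFKA_INTERNAL_ENDPOINT] if has_kafka else []) + non_loopback + loopback
--     return result or [KAFKA_INTERNAL_ENDPOINT]
-- ===== Notes on version B (the rewrite author's own statement) =====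
-- stated objective: simpler
-- what changed: A's three passes (dedup pass, then two rescans of the normalized list with 'entry not in prioritized' list-membership guards) are fused into one set-based pass that classifies each new entry on sight into non-loopback/loopback buckets and a has-kafka flag, assembling the result at the end.
import Mathlib
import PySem

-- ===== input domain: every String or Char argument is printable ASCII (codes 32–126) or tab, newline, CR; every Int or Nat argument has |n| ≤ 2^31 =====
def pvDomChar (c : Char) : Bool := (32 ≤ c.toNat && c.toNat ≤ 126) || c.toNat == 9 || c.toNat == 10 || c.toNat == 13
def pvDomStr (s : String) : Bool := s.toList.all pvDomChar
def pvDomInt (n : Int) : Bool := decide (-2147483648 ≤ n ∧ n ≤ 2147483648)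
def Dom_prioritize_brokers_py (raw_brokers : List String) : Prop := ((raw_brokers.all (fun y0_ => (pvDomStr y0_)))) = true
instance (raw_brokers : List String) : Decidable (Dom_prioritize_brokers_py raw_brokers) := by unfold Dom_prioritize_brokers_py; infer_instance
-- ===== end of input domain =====

-- B replaces A's three passes (normalize+dedup, then two rescans of the normalized
-- list with 'entry not in prioritized' guards) by ONE pass that classifies each new
-- entry on sight into non-loopback / loopback buckets plus a has-kafka flag.

-- ===== PORT A =====
def pvLoopbackHosts : PySem.Set (List Char) :=
  PySem.Set.ofList ["localhost".toList, "127.0.0.1".toList]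

def pvKafkaInternal : String := "kafka:29092"

-- _parse_host_port: partition(":"), default host "kafka", default port "29092".
-- int(...): Python raises ValueError where ofChars? is none; excluded by Pre_ (getD 0 unreachable there).
def pvParseHostPort (s : String) : List Char × Int :=
  let cs := s.toList
  let host := cs.takeWhile (fun c => c != ':')
  let port := (cs.dropWhile (fun c => c != ':')).tail
  ((if host.isEmpty then "kafka".toList else host),
   (PySem.Int.ofChars? (if port.isEmpty then "29092".toList else port)).getD 0)

-- first loop of A: normalize, dedup via seen
def pvAStep (st : List String × PySem.Set String) (broker : String) :
    List String × PySem.Set String :=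
  if broker = "" then st
  else
    let hp := pvParseHostPort (PySem.Str.strip broker)
    let entry := String.ofList (hp.1 ++ ':' :: PySem.Int.toChars hp.2)
    if entry ∈ st.2 then st else (st.1 ++ [entry], PySem.Set.add st.2 entry)

def prioritize_brokers_py (raw_brokers : List String) : List String :=
  let normalized := (raw_brokers.foldl pvAStep ([], PySem.Set.empty)).1
  let hasKafka := normalized.any (fun e => (pvParseHostPort e).1 == "kafka".toList)
  let p0 : List String := if hasKafka then [pvKafkaInternal] else []
  let p1 := normalized.foldl
    (fun acc e => if e ∉ acc ∧ (pvParseHostPort e).1 ∉ pvLoopbackHosts then acc ++ [e] else acc) p0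
  let p2 := normalized.foldl (fun acc e => if e ∉ acc then acc ++ [e] else acc) p1
  if p2 = [] then [pvKafkaInternal] else p2

-- ===== PORT B =====
-- _normalize: strip/partition with defaults, returns (host, canonical entry)
-- int(...): ValueError inputs are excluded by Pre_, getD 0 unreachable there
def pvNormalize (broker : String) : List Char × String :=
  let cs := (PySem.Str.strip broker).toList
  let host0 := cs.takeWhile (fun c => c != ':')
  let portS := (cs.dropWhile (fun c => c != ':')).tail
  let host := if host0.isEmpty then "kafka".toList else host0
  let portv := (PySem.Int.ofChars? (if portS.isEmpty then "29092".toList else portS)).getD 0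
  (host, String.ofList (host ++ ':' :: PySem.Int.toChars portv))

-- single classifying pass: state = (seen, non_loopback, loopback, has_kafka)
def pvBStep (st : PySem.Set String × List String × List String × Bool) (broker : String) :
    PySem.Set String × List String × List String × Bool :=
  if broker = "" then st
  else
    let hp := pvNormalize broker
    let host := hp.1
    let entry := hp.2
    if entry ∈ st.1 then st
    else
      let seen := PySem.Set.add st.1 entry
      let k := st.2.2.2 || (host == "kafka".toList)
      if host == "kafka".toList && entry == pvKafkaInternal then (seen, st.2.1, st.2.2.1, k)
      else if host ∈ pvLoopbackHosts then (seen, st.2.1, st.2.2.1 ++ [entry], k)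
      else (seen, st.2.1 ++ [entry], st.2.2.1, k)

def prioritize_brokers_py_alt (raw_brokers : List String) : List String :=
  let st := raw_brokers.foldl pvBStep (PySem.Set.empty, [], [], false)
  let result := (if st.2.2.2 then [pvKafkaInternal] else []) ++ st.2.1 ++ st.2.2.1
  if result = [] then [pvKafkaInternal] else result

-- ===== PRECONDITION & SPEC =====
-- the port part (or its default) of each non-empty entry, as int() sees it
def pvPortStr (b : String) : List Char :=
  let p := ((PySem.Str.strip b).toList.dropWhile (fun c => c != ':')).tail
  if p.isEmpty then "29092".toList else p

-- Pre_ excludes exactly the inputs where Python's int(port) raises ValueError.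
def Pre_prioritize_brokers_py (raw_brokers : List String) : Prop :=
  ∀ b ∈ raw_brokers, b ≠ "" → (PySem.Int.ofChars? (pvPortStr b)).isSome = true
instance (raw_brokers : List String) : Decidable (Pre_prioritize_brokers_py raw_brokers) := by
  unfold Pre_prioritize_brokers_py; infer_instance

def pvWitness_prioritize_brokers_py : List String := ["kafka:9092", "localhost:1", " :+7 "]

def Spec_prioritize_brokers_py (raw_brokers : List String) (out : List String) : Prop := out = prioritize_brokers_py_alt raw_brokers
instance (raw_brokers : List String) (out : List String) : Decidable (Spec_prioritize_brokers_py raw_brokers out) := by unfold Spec_prioritize_brokers_py; infer_instance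

-- ===== CLAIM (what is proved, stated in full; the proofs are below) =====
def Claim_equal_prioritize_brokers_py : Prop := ∀ (raw_brokers : List String), Dom_prioritize_brokers_py raw_brokers → Pre_prioritize_brokers_py raw_brokers → Spec_prioritize_brokers_py raw_brokers (prioritize_brokers_py raw_brokers)

-- ===== LEMMAS AND PROOFS =====

-- canonical entry produced from one raw broker
def pvCanonOf (b : String) : String := (pvNormalize b).2

def pvHostOf (e : String) : List Char := (pvParseHostPort e).1

def pvIsK (e : String) : Bool := pvHostOf e == "kafka".toList
def pvLBf (e : String) : Bool := decide (pvHostOf e ∈ pvLoopbackHosts)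
def pvSkipf (e : String) : Bool := pvIsK e && (e == pvKafkaInternal)
def pvNLp (e : String) : Bool := !pvSkipf e && !pvLBf e
def pvLBp (e : String) : Bool := !pvSkipf e && pvLBf e

-- the sequence of new canonical entries A's first pass appends, given entries already seen
def pvNew : List String → PySem.Set String → List String
  | [], _ => []
  | b :: bs, seen =>
    if b = "" then pvNew bs seen
    else
      let e := pvCanonOf b
      if e ∈ seen then pvNew bs seen else e :: pvNew bs (PySem.Set.add seen e)

theorem pvHost_props (s : String) :
    (pvParseHostPort s).1 ≠ [] ∧ ∀ c ∈ (pvParseHostPort s).1, (c != ':') = true := by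
  have hfst : (pvParseHostPort s).1 = if (s.toList.takeWhile (fun c => c != ':')).isEmpty
      then "kafka".toList else s.toList.takeWhile (fun c => c != ':') := rfl
  rw [hfst]
  by_cases h : (s.toList.takeWhile (fun c => c != ':')).isEmpty
  · rw [if_pos h]
    have hk : "kafka".toList = ['k', 'a', 'f', 'k', 'a'] := by simp
    rw [hk]
    exact ⟨by simp, by simp⟩
  · rw [if_neg h]
    refine ⟨by simpa [List.isEmpty_iff] using h, ?_⟩
    intro c hc
    exact List.mem_takeWhile_imp (p := fun c => c != ':') hc

theorem pvTakeWhile_no_colon : ∀ (h t : List Char), (∀ c ∈ h, (c != ':') = true) →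
    (h ++ ':' :: t).takeWhile (fun c => c != ':') = h := by
  intro h
  induction h with
  | nil => intro t _; simp
  | cons a h ih =>
    intro t hall
    have ha := hall a (List.mem_cons_self ..)
    simp [ha, ih t (fun c hc => hall c (List.mem_cons_of_mem _ hc))]

theorem pvNormalize_eq (b : String) :
    pvNormalize b = ((pvParseHostPort (PySem.Str.strip b)).1,
      String.ofList ((pvParseHostPort (PySem.Str.strip b)).1 ++
        ':' :: PySem.Int.toChars (pvParseHostPort (PySem.Str.strip b)).2)) := by
  simp only [pvNormalize, pvParseHostPort]

theorem pvCanonOf_eqA (b : String) :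
    pvCanonOf b = String.ofList ((pvParseHostPort (PySem.Str.strip b)).1 ++
      ':' :: PySem.Int.toChars (pvParseHostPort (PySem.Str.strip b)).2) := by
  rw [pvCanonOf, pvNormalize_eq]

theorem pvHostOf_canonOf (b : String) :
    pvHostOf (pvCanonOf b) = (pvNormalize b).1 := by
  obtain ⟨hne, hall⟩ := pvHost_props (PySem.Str.strip b)
  simp only [pvHostOf, pvCanonOf, pvNormalize_eq]
  conv_lhs => rw [pvParseHostPort]
  simp only [String.toList_ofList]
  rw [pvTakeWhile_no_colon _ _ hall]
  simp [List.isEmpty_iff, hne]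

theorem pvAStep_eq (st : List String × PySem.Set String) (b : String) (hb : b ≠ "") :
    pvAStep st b = if pvCanonOf b ∈ st.2 then st
      else (st.1 ++ [pvCanonOf b], PySem.Set.add st.2 (pvCanonOf b)) := by
  rw [pvCanonOf_eqA]
  simp only [pvAStep, if_neg hb]

theorem pvAfold_fst : ∀ (bs : List String) (N : List String) (seen : PySem.Set String),
    (bs.foldl pvAStep (N, seen)).1 = N ++ pvNew bs seen := by
  intro bs
  induction bs with
  | nil => intro N seen; simp [pvNew]
  | cons b bs ih =>
    intro N seen
    simp only [List.foldl_cons, pvNew]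
    by_cases hb : b = ""
    · simp [pvAStep, hb, ih]
    · rw [pvAStep_eq _ _ hb]
      by_cases hm : pvCanonOf b ∈ seen
      · simp [hb, hm, ih]
      · simp [hb, hm, ih, List.append_assoc]

theorem pvNew_notmem_seen : ∀ (bs : List String) (seen : PySem.Set String) (e : String),
    e ∈ pvNew bs seen → e ∉ seen := by
  intro bs
  induction bs with
  | nil => intro seen e he; simp [pvNew] at he
  | cons b bs ih =>
    intro seen e he
    simp only [pvNew] at he
    by_cases hb : b = ""
    · exact ih _ _ (by simpa [hb] using he)
    · rw [if_neg hb] at he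
      by_cases hm : pvCanonOf b ∈ seen
      · exact ih _ _ (by simpa [hm] using he)
      · rw [if_neg hm] at he
        rcases List.mem_cons.mp he with rfl | h2
        · exact hm
        · intro hs
          exact ih _ _ h2 (by simp [PySem.Set.add]; split <;> simp [hs])

theorem pvNew_nodup : ∀ (bs : List String) (seen : PySem.Set String), (pvNew bs seen).Nodup := by
  intro bs
  induction bs with
  | nil => intro seen; simp [pvNew]
  | cons b bs ih =>
    intro seen
    simp only [pvNew]
    by_cases hb : b = ""
    · simpa [hb] using ih seen
    · rw [if_neg hb]
      by_cases hm : pvCanonOf b ∈ seen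
      · simpa [hm] using ih seen
      · rw [if_neg hm]
        refine List.nodup_cons.mpr ⟨?_, ih _⟩
        intro hcon
        have := pvNew_notmem_seen _ _ _ hcon
        apply this
        simp [PySem.Set.add]
        split <;> simp_all

theorem pvBStep_eq (st : PySem.Set String × List String × List String × Bool) (b : String)
    (hb : b ≠ "") :
    pvBStep st b =
      (if pvCanonOf b ∈ st.1 then st
       else
         if pvSkipf (pvCanonOf b) then
           (PySem.Set.add st.1 (pvCanonOf b), st.2.1, st.2.2.1, st.2.2.2 || pvIsK (pvCanonOf b))
         else if pvLBf (pvCanonOf b) then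
           (PySem.Set.add st.1 (pvCanonOf b), st.2.1, st.2.2.1 ++ [pvCanonOf b],
            st.2.2.2 || pvIsK (pvCanonOf b))
         else
           (PySem.Set.add st.1 (pvCanonOf b), st.2.1 ++ [pvCanonOf b], st.2.2.1,
            st.2.2.2 || pvIsK (pvCanonOf b))) := by
  have hk : ((pvNormalize b).1 == "kafka".toList) = pvIsK (pvCanonOf b) := by
    rw [pvIsK, pvHostOf_canonOf]
  have hsk : (((pvNormalize b).1 == "kafka".toList)
      && (pvCanonOf b == pvKafkaInternal)) = pvSkipf (pvCanonOf b) := by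
    rw [pvSkipf, hk]
  have hlb2 : ((pvNormalize b).1 ∈ pvLoopbackHosts) = (pvLBf (pvCanonOf b) = true) := by
    rw [pvLBf, pvHostOf_canonOf]; simp
  have hbody : pvBStep st b =
      (if pvCanonOf b ∈ st.1 then st
       else
         if ((pvNormalize b).1 == "kafka".toList) && (pvCanonOf b == pvKafkaInternal) then
           (PySem.Set.add st.1 (pvCanonOf b), st.2.1, st.2.2.1,
            st.2.2.2 || ((pvNormalize b).1 == "kafka".toList))
         else if (pvNormalize b).1 ∈ pvLoopbackHosts then
           (PySem.Set.add st.1 (pvCanonOf b), st.2.1, st.2.2.1 ++ [pvCanonOf b],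
            st.2.2.2 || ((pvNormalize b).1 == "kafka".toList))
         else
           (PySem.Set.add st.1 (pvCanonOf b), st.2.1 ++ [pvCanonOf b], st.2.2.1,
            st.2.2.2 || ((pvNormalize b).1 == "kafka".toList))) := by
    simp only [pvBStep, pvCanonOf, if_neg hb]
  refine hbody.trans ?_
  simp only [hsk]
  simp only [hk]
  simp only [hlb2]

set_option maxHeartbeats 1000000 in
theorem pvBfold_snd : ∀ (bs : List String) (seen : PySem.Set String)
    (nlp lp : List String) (k : Bool),
    (bs.foldl pvBStep (seen, nlp, lp, k)).2 =
      (nlp ++ (pvNew bs seen).filter pvNLp,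
       lp ++ (pvNew bs seen).filter pvLBp,
       k || (pvNew bs seen).any pvIsK) := by
  intro bs
  induction bs with
  | nil => intro seen nlp lp k; simp [pvNew]
  | cons b bs ih =>
    intro seen nlp lp k
    simp only [List.foldl_cons, pvNew]
    by_cases hb : b = ""
    · simp [pvBStep, hb, ih]
    · rw [pvBStep_eq _ _ hb]
      by_cases hm : pvCanonOf b ∈ seen
      · simp [hb, hm, ih]
      · by_cases hs : pvSkipf (pvCanonOf b)
        · have h1 : pvNLp (pvCanonOf b) = false := by simp [pvNLp, hs]
          have h2 : pvLBp (pvCanonOf b) = false := by simp [pvLBp, hs]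
          have h3 : pvIsK (pvCanonOf b) = true :=
            (show pvIsK (pvCanonOf b) = true ∧ pvCanonOf b = pvKafkaInternal by
              simpa [pvSkipf] using hs).1
          simp [hb, hm, hs, h1, h2, h3, ih]
        · by_cases hl : pvLBf (pvCanonOf b)
          · have h1 : pvNLp (pvCanonOf b) = false := by simp [pvNLp, hl]
            have h2 : pvLBp (pvCanonOf b) = true := by simp [pvLBp, hs, hl]
            simp [hb, hm, hs, hl, h1, h2, ih, Bool.or_assoc, List.append_assoc]
          · have h1 : pvNLp (pvCanonOf b) = true := by simp [pvNLp, hs, hl]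
            have h2 : pvLBp (pvCanonOf b) = false := by simp [pvLBp, hl]
            simp [hb, hm, hs, hl, h1, h2, ih, Bool.or_assoc, List.append_assoc]

theorem pvPass2 : ∀ (l acc : List String), l.Nodup →
    l.foldl (fun acc e => if e ∉ acc ∧ (pvParseHostPort e).1 ∉ pvLoopbackHosts then acc ++ [e] else acc) acc
      = acc ++ l.filter (fun e => decide (e ∉ acc ∧ (pvParseHostPort e).1 ∉ pvLoopbackHosts)) := by
  intro l
  induction l with
  | nil => intro acc _; simp
  | cons e l ih =>
    intro acc hnd
    obtain ⟨hne, hnd2⟩ := List.nodup_cons.mp hnd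
    simp only [List.foldl_cons, List.filter_cons]
    by_cases hc : e ∉ acc ∧ (pvParseHostPort e).1 ∉ pvLoopbackHosts
    · rw [if_pos hc, ih _ hnd2]
      have hcg : l.filter (fun x => decide (x ∉ acc ++ [e] ∧ (pvParseHostPort x).1 ∉ pvLoopbackHosts))
           = l.filter (fun x => decide (x ∉ acc ∧ (pvParseHostPort x).1 ∉ pvLoopbackHosts)) := by
        apply List.filter_congr
        intro x hx
        have hxe : x ≠ e := fun h => hne (h ▸ hx)
        simp [List.mem_append, hxe]
      rw [hcg]
      simp [hc]
    · rw [if_neg hc, ih _ hnd2]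
      simp [hc]

theorem pvPass3 : ∀ (l acc : List String), l.Nodup →
    l.foldl (fun acc e => if e ∉ acc then acc ++ [e] else acc) acc
      = acc ++ l.filter (fun e => decide (e ∉ acc)) := by
  intro l
  induction l with
  | nil => intro acc _; simp
  | cons e l ih =>
    intro acc hnd
    obtain ⟨hne, hnd2⟩ := List.nodup_cons.mp hnd
    simp only [List.foldl_cons, List.filter_cons]
    by_cases hc : e ∉ acc
    · rw [if_pos hc, ih _ hnd2]
      have hcg : l.filter (fun x => decide (x ∉ acc ++ [e]))
           = l.filter (fun x => decide (x ∉ acc)) := by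
        apply List.filter_congr
        intro x hx
        have hxe : x ≠ e := fun h => hne (h ▸ hx)
        simp [List.mem_append, hxe]
      rw [hcg]
      simp [hc]
    · rw [if_neg hc, ih _ hnd2]
      simp [hc]

theorem pvIsK_kie : pvIsK pvKafkaInternal = true := by
  have hk : "kafka:29092".toList = ['k', 'a', 'f', 'k', 'a', ':', '2', '9', '0', '9', '2'] := by
    simp
  have hk2 : "kafka".toList = ['k', 'a', 'f', 'k', 'a'] := by simp
  simp only [pvIsK, pvHostOf, pvParseHostPort, pvKafkaInternal, hk, hk2]
  rfl

theorem pvSkipf_of_ne {x : String} (hx : x ≠ pvKafkaInternal) : pvSkipf x = false := by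
  simp [pvSkipf, hx]

theorem pvSkipf_kie : pvSkipf pvKafkaInternal = true := by
  simp [pvSkipf, pvIsK_kie]

theorem pvSkipf_of_not_isK {x : String} (hx : pvIsK x = false) : pvSkipf x = false := by
  simp [pvSkipf, hx]

theorem pvAssemble (N : List String) (p0 p1 : List String)
    (hp0 : p0 = if N.any pvIsK then [pvKafkaInternal] else [])
    (hp1 : p1 = p0 ++ N.filter (fun e => decide (e ∉ p0 ∧ (pvParseHostPort e).1 ∉ pvLoopbackHosts))) :
    p1 ++ N.filter (fun e => decide (e ∉ p1)) = p0 ++ N.filter pvNLp ++ N.filter pvLBp := by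
  have hLBf : ∀ x : String, pvLBf x = decide ((pvParseHostPort x).1 ∈ pvLoopbackHosts) :=
    fun x => rfl
  have hc2 : N.filter (fun e => decide (e ∉ p0 ∧ (pvParseHostPort e).1 ∉ pvLoopbackHosts))
      = N.filter pvNLp := by
    apply List.filter_congr
    intro x hx
    by_cases hK : N.any pvIsK = true
    · by_cases hxe : x = pvKafkaInternal
      · subst hxe
        simp [hp0, hK, pvNLp, pvSkipf_kie]
      · have hskip : pvSkipf x = false := pvSkipf_of_ne hxe
        by_cases hlb : (pvParseHostPort x).1 ∈ pvLoopbackHosts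
        · simp [hp0, hK, hxe, pvNLp, hskip, hLBf, hlb]
        · simp [hp0, hK, hxe, pvNLp, hskip, hLBf, hlb]
    · have hKf : N.any pvIsK = false := by simpa using hK
      have hIs : pvIsK x = false := by simpa using List.any_eq_false.mp hKf x hx
      have hskip : pvSkipf x = false := pvSkipf_of_not_isK hIs
      by_cases hlb : (pvParseHostPort x).1 ∈ pvLoopbackHosts
      · simp [hp0, hKf, pvNLp, hskip, hLBf, hlb]
      · simp [hp0, hKf, pvNLp, hskip, hLBf, hlb]
  have hc3 : N.filter (fun e => decide (e ∉ p1)) = N.filter pvLBp := by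
    apply List.filter_congr
    intro x hx
    rw [hp1, hc2]
    by_cases hK : N.any pvIsK = true
    · by_cases hxe : x = pvKafkaInternal
      · subst hxe
        simp [hp0, hK, pvLBp, pvSkipf_kie]
      · have hskip : pvSkipf x = false := pvSkipf_of_ne hxe
        by_cases hlb : (pvParseHostPort x).1 ∈ pvLoopbackHosts
        · simp [hp0, hK, hxe, hx, pvLBp, hskip, pvNLp, hLBf, hlb]
        · simp [hp0, hK, hxe, hx, pvLBp, hskip, pvNLp, hLBf, hlb]
    · have hKf : N.any pvIsK = false := by simpa using hK
      have hIs : pvIsK x = false := by simpa using List.any_eq_false.mp hKf x hx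
      have hskip : pvSkipf x = false := pvSkipf_of_not_isK hIs
      by_cases hlb : (pvParseHostPort x).1 ∈ pvLoopbackHosts
      · simp [hp0, hKf, hx, pvLBp, hskip, pvNLp, hLBf, hlb]
      · simp [hp0, hKf, hx, pvLBp, hskip, pvNLp, hLBf, hlb]
  rw [hc3, hp1, hc2, List.append_assoc]

-- ===== VERDICT (by name: the statement is the Claim_ definition above) =====
theorem prioritize_brokers_py_spec : Claim_equal_prioritize_brokers_py := by
  intro raw _dom _pre
  unfold Spec_prioritize_brokers_py prioritize_brokers_py prioritize_brokers_py_alt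
  have hN := pvAfold_fst raw [] PySem.Set.empty
  have hB := pvBfold_snd raw PySem.Set.empty [] [] false
  have hfun : (fun e => (pvParseHostPort e).1 == "kafka".toList) = pvIsK := rfl
  simp only [hN, hB, List.nil_append, Bool.false_or, hfun]
  rw [pvPass2 _ _ (pvNew_nodup _ _), pvPass3 _ _ (pvNew_nodup _ _)]
  rw [pvAssemble (pvNew raw PySem.Set.empty) _ _ rfl rfl]
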